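-- pv_equiv track=rewrite | github.com/venux021/soda | works/zcy2/c5/q19.py | find_char
-- ===== SOURCE A (Python) =====
-- import string
--
-- def find_char(s, k):
--     n = len(s)
--     i = 0
--     last_char = None
--     while i < n:
--         if i > k:
--             return last_char
--         if s[i] in string.ascii_lowercase:
--             last_char = s[i]
--             i += 1
--         else:
--             last_char = s[i:i+2]
--             i += 2
--     if i > k:
--         return last_char
-- ===== SOURCE B (Python) =====
-- import string
--
-- def find_char(s, k):
--     # Pass 1: materialize token table (start, end, text); lowercase -> 1 char, else 2-char slice.
--     tokens = []
--     i = 0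
--     while i < len(s):
--         if s[i] in string.ascii_lowercase:
--             tokens.append((i, i + 1, s[i]))
--             i += 1
--         else:
--             tokens.append((i, i + 2, s[i:i + 2]))
--             i += 2
--     # Pass 2: return the token whose interval contains k.
--     for start, end, text in tokens:
--         if start <= k < end:
--             return text
--     return None
-- ===== Notes on version B (the rewrite author's own statement) =====
-- stated objective: alternative
-- what changed: B replaces A's single stateful while-loop (carrying last_char and early-returning mid-scan) by two passes: first materialize a token table of (start, end, text) intervals, then look up the first token whose interval contains k.
import Mathlib
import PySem

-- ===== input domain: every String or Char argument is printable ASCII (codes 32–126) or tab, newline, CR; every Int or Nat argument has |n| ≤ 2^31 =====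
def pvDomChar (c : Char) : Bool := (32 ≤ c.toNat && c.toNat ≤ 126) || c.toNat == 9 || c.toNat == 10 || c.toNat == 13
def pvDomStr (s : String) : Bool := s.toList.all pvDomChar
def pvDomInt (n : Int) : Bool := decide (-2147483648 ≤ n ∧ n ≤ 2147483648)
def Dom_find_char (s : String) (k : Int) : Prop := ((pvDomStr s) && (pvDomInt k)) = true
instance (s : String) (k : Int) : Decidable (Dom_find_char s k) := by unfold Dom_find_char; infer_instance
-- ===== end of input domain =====

-- B replaces A's single stateful while-loop by a tokenize pass plus an interval-lookup pass (alternative decomposition, same cost).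

-- ===== PORT A =====
-- string.ascii_lowercase
def asciiLower : List Char := "abcdefghijklmnopqrstuvwxyz".toList

-- A's while-loop: state (i, last_char); fuel ≥ cs.length - i only makes the recursion structural
def findCharLoopA (cs : List Char) (k : Int) : Nat → Nat → Option (List Char) → Option (List Char)
  | 0, i, last => if (i : Int) > k then last else none
  | fuel + 1, i, last =>
    if h : i < cs.length then
      if (i : Int) > k then last
      else if cs[i] ∈ asciiLower then
        findCharLoopA cs k fuel (i + 1) (some [cs[i]])
      else
        findCharLoopA cs k fuel (i + 2)
          (some (PySem.List.slice cs (some (i : Int)) (some ((i : Int) + 2))))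
    else
      if (i : Int) > k then last else none

def find_char (s : String) (k : Int) : Option String :=
  (findCharLoopA s.toList k s.toList.length 0 none).map String.ofList

-- ===== PORT B =====
-- pass 1 of B: the token table [(start, end, text), …]; same fuel guard
def tokenize (cs : List Char) : Nat → Nat → List (Nat × Nat × List Char)
  | 0, _ => []
  | fuel + 1, i =>
    if h : i < cs.length then
      if cs[i] ∈ asciiLower then
        (i, i + 1, [cs[i]]) :: tokenize cs fuel (i + 1)
      else
        (i, i + 2, PySem.List.slice cs (some (i : Int)) (some ((i : Int) + 2))) ::
          tokenize cs fuel (i + 2)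
    else []

-- pass 2 of B: first token whose interval contains k
def findTok (toks : List (Nat × Nat × List Char)) (k : Int) : Option (List Char) :=
  match toks with
  | [] => none
  | (a, b, t) :: rest => if (a : Int) ≤ k ∧ k < (b : Int) then some t else findTok rest k

def find_char_alt (s : String) (k : Int) : Option String :=
  (findTok (tokenize s.toList s.toList.length 0) k).map String.ofList

-- ===== PRECONDITION & SPEC =====
def Spec_find_char (s : String) (k : Int) (out : Option String) : Prop := out = find_char_alt s k
instance (s : String) (k : Int) (out : Option String) : Decidable (Spec_find_char s k out) := by unfold Spec_find_char; infer_instance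

-- ===== CLAIM (what is proved, stated in full; the proofs are below) =====
def Claim_equal_find_char : Prop := ∀ (s : String) (k : Int), Dom_find_char s k → Spec_find_char s k (find_char s k)

-- ===== LEMMAS AND PROOFS =====

-- once the index has passed k, A's loop returns its carried last_char immediately
theorem loopA_gt (cs : List Char) (k : Int) (fuel i : Nat) (last : Option (List Char))
    (h : (i : Int) > k) : findCharLoopA cs k fuel i last = last := by
  cases fuel with
  | zero => rw [findCharLoopA, if_pos h]
  | succ n =>
      rw [findCharLoopA]
      by_cases hl : i < cs.length
      · rw [dif_pos hl, if_pos h]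
      · rw [dif_neg hl, if_pos h]

-- when k is below every token start, no interval contains k
theorem findTok_of_lt (toks : List (Nat × Nat × List Char)) (k : Int)
    (h : ∀ p ∈ toks, k < (p.1 : Int)) : findTok toks k = none := by
  induction toks with
  | nil => rfl
  | cons p rest ih =>
      obtain ⟨a, b, t⟩ := p
      have ha := h _ List.mem_cons_self
      rw [findTok, if_neg (by intro ⟨h1, _⟩; omega),
        ih (fun q hq => h _ (List.mem_cons_of_mem _ hq))]

-- while the index has not passed k, A's loop computes B's interval lookup over the remaining tokens
theorem loopA_eq_findTok (cs : List Char) (k : Int) :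
    ∀ (fuel i : Nat) (last : Option (List Char)), cs.length - i ≤ fuel → (i : Int) ≤ k →
      findCharLoopA cs k fuel i last = findTok (tokenize cs fuel i) k := by
  intro fuel
  induction fuel with
  | zero =>
      intro i last hfuel hk
      rw [findCharLoopA, if_neg (not_lt.mpr hk), tokenize, findTok]
  | succ n ih =>
      intro i last hfuel hk
      by_cases hl : i < cs.length
      · rw [findCharLoopA, dif_pos hl, if_neg (not_lt.mpr hk), tokenize, dif_pos hl]
        by_cases hc : cs[i]'hl ∈ asciiLower
        · rw [if_pos hc, if_pos hc, findTok]
          by_cases hk1 : k < ((i : Nat) + 1 : Nat)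
          · rw [if_pos ⟨hk, by exact_mod_cast hk1⟩]
            exact loopA_gt cs k n (i + 1) _ (by push_cast; omega)
          · rw [if_neg (by intro ⟨_, h2⟩; exact hk1 (by exact_mod_cast h2))]
            exact ih (i + 1) _ (by omega) (by push_cast at hk1 ⊢; omega)
        · rw [if_neg hc, if_neg hc, findTok]
          by_cases hk2 : k < ((i : Nat) + 2 : Nat)
          · rw [if_pos ⟨hk, by exact_mod_cast hk2⟩]
            exact loopA_gt cs k n (i + 2) _ (by push_cast at hk2 ⊢; omega)
          · rw [if_neg (by intro ⟨_, h2⟩; exact hk2 (by exact_mod_cast h2))]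
            exact ih (i + 2) _ (by omega) (by push_cast at hk2 ⊢; omega)
      · rw [findCharLoopA, dif_neg hl, if_neg (not_lt.mpr hk), tokenize, dif_neg hl, findTok]

-- ===== VERDICT (by name: the statement is the Claim_ definition above) =====
theorem find_char_spec : Claim_equal_find_char := by
  intro s k _
  unfold Spec_find_char find_char find_char_alt
  by_cases hk : (0 : Int) ≤ k
  · rw [loopA_eq_findTok s.toList k s.toList.length 0 none (by omega) hk]
  · rw [loopA_gt s.toList k s.toList.length 0 none (by omega), findTok_of_lt]
    intro p _
    have : (0 : Int) ≤ (p.1 : Int) := Int.natCast_nonneg _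
    omega
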